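-- pv_equiv track=rewrite | github.com/favalon/AutoCamera | optimization/main.py | translate_path
-- ===== SOURCE A (Python) =====
-- def translate_path(path):
--     tran_path = {"cam_sequence": []}
--     start_time = 0
--     previous_cam = None
--     duration = 0
--     for i, p in enumerate(path):
--         if i == 0:
--             start_time = 0
--             previous_cam = p[1]
--             duration = 1
--         elif i != len(path) - 1:
--             if p[1] == previous_cam:
--                 duration += 1
--             else:
--                 pattern = {"startTime": start_time, "duration": duration, "camIndex": previous_cam, "tracking": 0}
--                 tran_path["cam_sequence"].append(pattern)
--                 previous_cam = p[1]
--                 start_time += duration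
--                 duration = 1
--         else:
--             pattern = {"startTime": start_time, "duration": duration, "camIndex": p[1], "tracking": 0}
--             tran_path["cam_sequence"].append(pattern)
--
--     return tran_path
-- ===== SOURCE B (Python) =====
-- def translate_path(path):
--     # Two-phase: run-length encode the cams of path[:-1], then emit timed segments;
--     # the last segment takes the final element's cam, as the original does.
--     if len(path) <= 1:
--         return {"cam_sequence": []}
--     cams = [p[1] for p in path[:-1]]
--     runs = []
--     i = 0
--     n = len(cams)
--     while i < n:
--         j = i
--         while j < n and cams[j] == cams[i]:
--             j += 1
--         runs.append((cams[i], j - i))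
--         i = j
--     seq = []
--     t = 0
--     last = len(runs) - 1
--     for k, (cam, length) in enumerate(runs):
--         idx = path[-1][1] if k == last else cam
--         seq.append({"startTime": t, "duration": length, "camIndex": idx, "tracking": 0})
--         t += length
--     return {"cam_sequence": seq}
-- ===== Notes on version B (the rewrite author's own statement) =====
-- stated objective: alternative
-- what changed: Replaces A's single stateful enumerate loop with index-flag special cases by a two-phase decomposition: first run-length encode the cams of path[:-1] into (cam, length) runs, then a second pass emits one timed segment per run (last segment's camIndex taken from path[-1]).
import Mathlib
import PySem

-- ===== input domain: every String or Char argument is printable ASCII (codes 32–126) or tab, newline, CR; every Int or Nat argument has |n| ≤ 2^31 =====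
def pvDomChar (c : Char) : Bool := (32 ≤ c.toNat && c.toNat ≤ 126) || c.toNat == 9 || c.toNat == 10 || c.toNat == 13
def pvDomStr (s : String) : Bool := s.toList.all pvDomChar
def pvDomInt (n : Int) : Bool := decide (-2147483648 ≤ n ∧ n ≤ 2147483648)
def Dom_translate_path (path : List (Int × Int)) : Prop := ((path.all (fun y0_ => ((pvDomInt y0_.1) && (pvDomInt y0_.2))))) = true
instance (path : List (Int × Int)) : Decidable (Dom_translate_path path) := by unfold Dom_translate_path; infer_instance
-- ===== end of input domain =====

-- B re-decomposes A's single stateful loop into run-length encoding of path[:-1] plus a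
-- second emission pass (same O(n) cost; objective: alternative decomposition).

-- ===== PORT A =====
-- state: (start_time, previous_cam, duration, cam_sequence); previous_cam is Option Int (None at start).
-- The emitted dict {"startTime":…, "duration":…, "camIndex":…, "tracking":0} is the 4-entry assoc list.
def aStep (n : Int) (s : Int × Option Int × Int × List (List (String × Int)))
    (ip : Int × (Int × Int)) : Int × Option Int × Int × List (List (String × Int)) :=
  let (st, prev, dur, seq) := s
  let (i, p) := ip
  if i = 0 then
    (0, some p.2, 1, seq)
  else if i ≠ n - 1 then
    if some p.2 = prev then
      (st, prev, dur + 1, seq)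
    else
      (st + dur, some p.2, 1,
        seq ++ [[("startTime", st), ("duration", dur), ("camIndex", prev.getD 0), ("tracking", 0)]])
      -- prev.getD 0: previous_cam is always set here in Python (the i = 0 iteration runs first)
  else
    (st, prev, dur, seq ++ [[("startTime", st), ("duration", dur), ("camIndex", p.2), ("tracking", 0)]])

def translate_path (path : List (Int × Int)) : List (String × List (List (String × Int))) :=
  let s := (PySem.List.enumerate path 0).foldl (aStep (path.length : Int)) (0, none, 0, [])
  [("cam_sequence", s.2.2.2)]

-- ===== PORT B =====
-- run-length encoding of a cam list: the two nested while loops of Source B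
def bRuns : List Int → List (Int × Int)
  | [] => []
  | c :: cs =>
      (c, 1 + ((cs.takeWhile (fun x => x == c)).length : Int)) ::
        bRuns (cs.dropWhile (fun x => x == c))
termination_by cs => cs.length
decreasing_by
  exact Nat.lt_succ_of_le (List.length_dropWhile_le _ _)

-- the emission loop of Source B: one segment per run, the last one carries lastCam
def bEmit (lastCam : Int) : Int → List (Int × Int) → List (List (String × Int))
  | _, [] => []
  | t, [(_, d)] =>
      [[("startTime", t), ("duration", d), ("camIndex", lastCam), ("tracking", 0)]]
  | t, (c, d) :: r =>
      [("startTime", t), ("duration", d), ("camIndex", c), ("tracking", 0)] :: bEmit lastCam (t + d) r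

def translate_path_alt (path : List (Int × Int)) : List (String × List (List (String × Int))) :=
  if path.length ≤ 1 then [("cam_sequence", [])]
  else
    let cams := path.dropLast.map (·.2)
    let lastCam := (path.getLast?.getD (0, 0)).2   -- path[-1][1]; path is nonempty here
    [("cam_sequence", bEmit lastCam 0 (bRuns cams))]

-- ===== PRECONDITION & SPEC =====
def Spec_translate_path (path : List (Int × Int)) (out : List (String × List (List (String × Int)))) : Prop := out = translate_path_alt path
instance (path : List (Int × Int)) (out : List (String × List (List (String × Int)))) : Decidable (Spec_translate_path path out) := by unfold Spec_translate_path; infer_instance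

-- ===== CLAIM (what is proved, stated in full; the proofs are below) =====
def Claim_equal_translate_path : Prop := ∀ (path : List (Int × Int)), Dom_translate_path path → Spec_translate_path path (translate_path path)

-- ===== LEMMAS AND PROOFS =====

-- A's loop on elements 1..n-2, rewritten without indices (proof-side characterization)
def aRun (L : Int) : Int → Int → Int → List Int → List (List (String × Int))
  | st, _, dur, [] =>
      [[("startTime", st), ("duration", dur), ("camIndex", L), ("tracking", 0)]]
  | st, prev, dur, c :: cs =>
      if c = prev then aRun L st prev (dur + 1) cs
      else [("startTime", st), ("duration", dur), ("camIndex", prev), ("tracking", 0)] ::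
             aRun L (st + dur) c 1 cs

-- run-length encoding seeded with an open run (prev, dur)
def runsW : Int → Int → List Int → List (Int × Int)
  | prev, dur, [] => [(prev, dur)]
  | prev, dur, c :: cs =>
      if c = prev then runsW prev (dur + 1) cs else (prev, dur) :: runsW c 1 cs

theorem runsW_ne_nil (prev dur : Int) (cs : List Int) : runsW prev dur cs ≠ [] := by
  induction cs generalizing prev dur with
  | nil => simp [runsW]
  | cons c cs ih =>
      simp only [runsW]
      split
      · exact ih _ _
      · simp

theorem aFold_eq_aRun (n : Int) (mid : List (Int × Int)) (plast : Int × Int)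
    (k st prev dur : Int) (acc : List (List (String × Int)))
    (hk : 1 ≤ k) (hn : k + mid.length + 1 = n) :
    ((PySem.List.enumerate (mid ++ [plast]) k).foldl (aStep n) (st, some prev, dur, acc)).2.2.2
      = acc ++ aRun plast.2 st prev dur (mid.map (·.2)) := by
  induction mid generalizing k st prev dur acc with
  | nil =>
      simp only [List.nil_append, PySem.List.enumerate_cons, PySem.List.enumerate_nil,
        List.foldl_cons, List.foldl_nil, aStep, List.map_nil, aRun]
      have hk0 : ¬ k = 0 := by omega
      have hk1 : ¬ k ≠ n - 1 := by simp at hn ⊢; omega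
      simp [hk0, hk1]
  | cons m mid ih =>
      simp only [List.cons_append, PySem.List.enumerate_cons, List.foldl_cons, aStep]
      have hk0 : ¬ (k = 0) := by omega
      have hk1 : k ≠ n - 1 := by simp at hn; omega
      rw [if_neg hk0, if_pos hk1]
      by_cases hc : m.2 = prev
      · rw [if_pos (by rw [hc])]
        rw [ih (k+1) st prev (dur+1) acc (by omega) (by simp at hn ⊢; omega)]
        simp [aRun, hc]
      · rw [if_neg (by simpa using hc)]
        rw [ih (k+1) (st+dur) m.2 1 _ (by omega) (by simp at hn ⊢; omega)]
        simp [aRun, hc, List.append_assoc]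

theorem aRun_eq_bEmit (L : Int) (cs : List Int) (st prev dur : Int) :
    aRun L st prev dur cs = bEmit L st (runsW prev dur cs) := by
  induction cs generalizing st prev dur with
  | nil => simp [aRun, runsW, bEmit]
  | cons c cs ih =>
      simp only [aRun, runsW]
      by_cases hc : c = prev
      · simp [hc, ih]
      · obtain ⟨x, xs, hx⟩ := List.exists_cons_of_ne_nil (runsW_ne_nil c 1 cs)
        rw [if_neg hc, if_neg hc, hx]
        simp only [bEmit]
        rw [← hx, ih]

theorem runsW_eq_bRuns (cs : List Int) (c d : Int) :
    runsW c d cs = (c, d + ((cs.takeWhile (fun x => x == c)).length : Int)) ::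
      bRuns (cs.dropWhile (fun x => x == c)) := by
  induction cs generalizing c d with
  | nil => simp [runsW, bRuns]
  | cons x cs ih =>
      by_cases hx : x = c
      · simp only [runsW, hx, List.takeWhile_cons, beq_self_eq_true, if_pos,
          List.dropWhile_cons]
        rw [ih]
        simp only [List.length_cons, List.cons.injEq, Prod.mk.injEq, true_and, and_true]
        push_cast
        omega
      · have hb : (x == c) = false := by simp [hx]
        simp only [runsW, hx, List.takeWhile_cons, hb,
          List.dropWhile_cons]
        simp only [Bool.false_eq_true, if_false, List.length_nil, Int.natCast_zero, add_zero]
        rw [ih, bRuns]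

theorem bRuns_cons (c : Int) (cs : List Int) : bRuns (c :: cs) = runsW c 1 cs := by
  rw [runsW_eq_bRuns]
  simp only [bRuns]

-- ===== VERDICT (by name: the statement is the Claim_ definition above) =====
theorem translate_path_spec : Claim_equal_translate_path := by
  intro path _
  unfold Spec_translate_path
  match path with
  | [] => rfl
  | [p] => simp [translate_path, translate_path_alt, PySem.List.enumerate_cons,
      PySem.List.enumerate_nil, aStep]
  | p :: q :: rest =>
      have hne : (q :: rest : List (Int × Int)) ≠ [] := by simp
      have hsplit : (q :: rest : List (Int × Int)).dropLast ++ [(q :: rest).getLast hne] = q :: rest :=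
        List.dropLast_append_getLast hne
      have hA : translate_path (p :: q :: rest)
          = [("cam_sequence",
              aRun ((q :: rest).getLast hne).2 0 p.2 1 ((q :: rest).dropLast.map (·.2)))] := by
        simp only [translate_path]
        conv_lhs => rw [← hsplit]
        simp only [PySem.List.enumerate_cons, List.foldl_cons]
        have h0 : aStep ((p :: ((q :: rest).dropLast ++ [(q :: rest).getLast hne]) : List (Int × Int)).length : Int)
            (0, none, 0, []) (0, p) = (0, some p.2, 1, []) := by simp [aStep]
        rw [h0, aFold_eq_aRun _ _ _ _ _ _ _ _ (by omega) (by simp; omega)]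
        simp
      have hB : translate_path_alt (p :: q :: rest)
          = [("cam_sequence",
              bEmit ((q :: rest).getLast hne).2 0 (runsW p.2 1 ((q :: rest).dropLast.map (·.2))))] := by
        simp only [translate_path_alt]
        rw [if_neg (by simp)]
        have hdl : (p :: q :: rest : List (Int × Int)).dropLast = p :: (q :: rest).dropLast := rfl
        have hgl : ((p :: q :: rest : List (Int × Int)).getLast?.getD ((0 : Int), (0 : Int)))
            = (q :: rest).getLast hne := by
          rw [List.getLast?_eq_some_getLast (by simp), Option.getD_some, List.getLast_cons hne]
        rw [hdl, hgl, List.map_cons, bRuns_cons]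
      rw [hA, hB, aRun_eq_bEmit]
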